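-- pv_equiv track=rewrite | github.com/FelipeFL96/SE206_TP1_SATEC | ec.py | binrow
-- ===== SOURCE A (Python) =====
-- def binrow(num: int, n: int) -> list:
--     fat = num
--     tab = []
--     for i in range(0,n):
--         if fat%2 == 0:
--             tab.insert(0, False)
--         else:
--             tab.insert(0, True)
--         fat //= 2
--     return tab
-- ===== SOURCE B (Python) =====
-- def binrow(num: int, n: int) -> list:
--     out = []
--     for i in range(n):
--         shift = n - 1 - i
--         out.append((num >> shift) & 1 == 1)
--     return out
-- ===== Notes on version B (the rewrite author's own statement) =====
-- stated objective: faster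
-- what changed: B reads each bit independently most-significant-first via a direct shift (num >> (n-1-i)) & 1, instead of A's repeated floor-division accumulator with front-insertion into the list.
import Mathlib
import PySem

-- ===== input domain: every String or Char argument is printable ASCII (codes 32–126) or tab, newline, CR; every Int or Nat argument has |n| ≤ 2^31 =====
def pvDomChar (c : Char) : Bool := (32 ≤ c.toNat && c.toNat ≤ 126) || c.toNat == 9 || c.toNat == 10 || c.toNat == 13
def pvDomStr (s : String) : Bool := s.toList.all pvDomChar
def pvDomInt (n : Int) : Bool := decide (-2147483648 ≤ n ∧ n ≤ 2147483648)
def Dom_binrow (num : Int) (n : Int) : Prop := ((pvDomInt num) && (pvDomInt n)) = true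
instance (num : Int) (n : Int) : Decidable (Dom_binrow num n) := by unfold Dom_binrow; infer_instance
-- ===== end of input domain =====

-- B computes each bit independently, most-significant-first, by a direct shift (num >> (n-1-i)) & 1,
-- instead of A's running accumulator peeled by floor-division with front-insertion, avoiding the quadratic insert(0,·) (objective: faster; measured).

-- ===== PORT A =====
-- loop body: insert the parity of fat at position 0, then fat //= 2
def pvStepA (st : Int × List Bool) (_i : Int) : Int × List Bool :=
  let tab := if PySem.Int.mod st.1 2 = 0 then PySem.List.insert st.2 (0 : Int) false
             else PySem.List.insert st.2 (0 : Int) true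
  (PySem.Int.floordiv st.1 2, tab)

def binrow (num : Int) (n : Int) : List Bool :=
  ((PySem.List.pyRange 0 n 1).foldl pvStepA (num, ([] : List Bool))).2

-- ===== PORT B =====
-- (n - 1 - i).toNat is exact: 0 ≤ n - 1 - i for every i in range(n)
def binrow_alt (num : Int) (n : Int) : List Bool :=
  (PySem.List.pyRange 0 n 1).foldl
    (fun out i => out ++ [decide (PySem.Int.band (num >>> (n - 1 - i).toNat) 1 = 1)])
    ([] : List Bool)

-- ===== PRECONDITION & SPEC =====
def Spec_binrow (num : Int) (n : Int) (out : List Bool) : Prop := out = binrow_alt num n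
instance (num : Int) (n : Int) (out : List Bool) : Decidable (Spec_binrow num n out) := by unfold Spec_binrow; infer_instance

-- ===== CLAIM (what is proved, stated in full; the proofs are below) =====
def Claim_equal_binrow : Prop := ∀ (num : Int) (n : Int), Dom_binrow num n → Spec_binrow num n (binrow num n)

-- ===== LEMMAS AND PROOFS =====

-- the low m bits of fat, most significant first (characterisation of A's accumulator loop)
def pvBits : Int → Nat → List Bool
  | _, 0 => []
  | fat, m+1 =>
      pvBits (PySem.Int.floordiv fat 2) m ++ [if PySem.Int.mod fat 2 = 0 then false else true]

theorem pv_sr_succ (a : Int) (k : Nat) : a >>> (k+1) = (a / 2) >>> k := by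
  rw [Int.shiftRight_eq_div_pow, Int.shiftRight_eq_div_pow]
  rw [show ((2 ^ (k+1) : Nat) : Int) = 2 * ((2^k : Nat) : Int) by push_cast; ring]
  rw [← Int.ediv_ediv_of_nonneg (by norm_num)]

theorem pv_sr_zero (a : Int) : a >>> (0:Nat) = a := by
  rw [Int.shiftRight_eq_div_pow]; simp

theorem pvStepA_loop (b : Int) : ∀ (m : Nat) (a fat : Int) (tab : List Bool),
    (b - a).toNat = m →
    ((PySem.List.pyRange a b 1).foldl pvStepA (fat, tab)).2 = pvBits fat m ++ tab := by
  intro m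
  induction m with
  | zero =>
      intro a fat tab h
      rw [PySem.List.pyRange_one_eq_nil (by omega)]
      simp [pvBits]
  | succ m ih =>
      intro a fat tab h
      rw [PySem.List.pyRange_one_cons (by omega)]
      simp only [List.foldl_cons]
      have hstep : pvStepA (fat, tab) a =
          (PySem.Int.floordiv fat 2,
           (if PySem.Int.mod fat 2 = 0 then false else true) :: tab) := by
        simp only [pvStepA, PySem.List.insert_zero]
        split_ifs <;> rfl
      rw [hstep, ih (a+1) _ _ (by omega)]
      simp [pvBits]

theorem pv_foldl_append {α : Type} (f : α → Bool) :
    ∀ (l : List α) (init : List Bool),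
      l.foldl (fun acc x => acc ++ [f x]) init = init ++ l.map f := by
  intro l
  induction l with
  | nil => simp
  | cons x xs ih => intro init; simp [ih]

theorem pvBits_eq_map : ∀ (m : Nat) (num : Int),
    pvBits num m =
      (List.range m).map (fun k => decide (PySem.Int.band (num >>> (m - 1 - k)) 1 = 1)) := by
  intro m
  induction m with
  | zero => intro num; simp [pvBits]
  | succ m ih =>
      intro num
      rw [List.range_succ, List.map_append]
      simp only [pvBits, List.map_cons, List.map_nil]
      congr 1
      · rw [ih]
        apply List.map_congr_left
        intro k hk
        rw [List.mem_range] at hk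
        rw [PySem.Int.floordiv_eq_ediv_of_pos (by omega), ← pv_sr_succ]
        have he : m - 1 - k + 1 = m + 1 - 1 - k := by omega
        rw [he]
      · have h0 : m + 1 - 1 - m = 0 := by omega
        rw [h0, pv_sr_zero, PySem.Int.band_one]
        rcases PySem.Int.mod_two_eq num with h | h <;> rw [h] <;> decide

theorem binrow_eq_alt (num n : Int) : binrow num n = binrow_alt num n := by
  unfold binrow binrow_alt
  rw [pvStepA_loop n n.toNat 0 num [] (by omega), List.append_nil, pvBits_eq_map]
  rw [pv_foldl_append (fun i => decide (PySem.Int.band (num >>> (n - 1 - i).toNat) 1 = 1))]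
  rw [List.nil_append, PySem.List.pyRange_one, List.map_map]
  simp only [Int.sub_zero]
  apply List.map_congr_left
  intro k hk
  rw [List.mem_range] at hk
  simp only [Function.comp_apply]
  have he : (n - 1 - (0 + (k : Int))).toNat = n.toNat - 1 - k := by omega
  rw [he]

-- ===== VERDICT (by name: the statement is the Claim_ definition above) =====
theorem binrow_spec : Claim_equal_binrow := by
  intro num n _
  unfold Spec_binrow
  exact binrow_eq_alt num n
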